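-- pv_equiv track=rewrite | github.com/nchikkam/test | snippets/commonutils/binary.py | bin_num
-- ===== SOURCE A (Python) =====
-- def bin_num(x):
--     sign = ''
--     if x < 0:
--         sign = '-'
--
--     x = abs(x)
--     bits = []
--     while x:
--         x, rmost = divmod(x, 2)
--         bits.append(rmost)
--     return sign + ''.join(str(b) for b in reversed(bits or [0]))
-- ===== SOURCE B (Python) =====
-- def bin_num(x):
--     sign = '-' if x < 0 else ''
--     n = abs(x)
--     if n == 0:
--         return sign + '0'
--     return sign + ''.join(str((n >> i) & 1) for i in range(n.bit_length() - 1, -1, -1))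
-- ===== Notes on version B (the rewrite author's own statement) =====
-- stated objective: alternative
-- what changed: B emits the bits most-significant-first by shift-and-mask over descending bit positions obtained from bit_length(), instead of A's divmod-accumulate loop followed by a reversal.
import Mathlib
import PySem

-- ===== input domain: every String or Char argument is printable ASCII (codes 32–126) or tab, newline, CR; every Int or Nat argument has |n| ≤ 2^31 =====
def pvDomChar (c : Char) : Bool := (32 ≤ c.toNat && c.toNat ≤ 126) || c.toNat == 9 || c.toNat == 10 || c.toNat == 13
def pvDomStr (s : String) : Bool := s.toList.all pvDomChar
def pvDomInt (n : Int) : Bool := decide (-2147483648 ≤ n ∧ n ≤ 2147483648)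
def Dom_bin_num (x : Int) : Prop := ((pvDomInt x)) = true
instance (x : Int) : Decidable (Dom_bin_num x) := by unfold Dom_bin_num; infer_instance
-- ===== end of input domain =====

-- B emits the bits most-significant-first by shift-and-mask over descending bit
-- positions obtained from bit_length(), instead of A's divmod-accumulate loop
-- followed by a reversal (objective: alternative decomposition, same cost).

-- ===== PORT A =====
-- A's 'while x: x, rmost = divmod(x, 2); bits.append(rmost)'.  The loop is only ever
-- entered with x = abs(..) ≥ 0, where Python's 'while x' is exactly '0 < x'.
def binA_loop (x : Int) : List Int :=
  if _h : 0 < x then PySem.Int.mod x 2 :: binA_loop (PySem.Int.floordiv x 2)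
  else []
termination_by x.toNat
decreasing_by
  have : PySem.Int.floordiv x 2 = x / 2 := PySem.Int.floordiv_eq_ediv_of_pos (by omega)
  rw [this]; omega

def bin_num (x : Int) : String :=
  let sign : String := if x < 0 then "-" else ""
  let bits : List Int := binA_loop |x|
  sign ++ PySem.Str.join "" ((if bits = [] then [(0 : Int)] else bits).reverse.map PySem.Int.toStr)

-- ===== PORT B =====
-- The descending range loop: every i in it is nonnegative, so i.toNat is exact;
-- the shift-and-mask '(n >> i) & 1' is PySem.Int.band (n >>> i.toNat) 1.
def bin_num_alt (x : Int) : String :=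
  let sign : String := if x < 0 then "-" else ""
  let n : Int := |x|
  if n = 0 then sign ++ "0"
  else
    sign ++ PySem.Str.join ""
      ((PySem.List.pyRange ((PySem.Int.bitLength n : Int) - 1) (-1) (-1)).map
        (fun i => PySem.Int.toStr (PySem.Int.band (n >>> i.toNat) 1)))

-- ===== PRECONDITION & SPEC =====
def Spec_bin_num (x : Int) (out : String) : Prop := out = bin_num_alt x
instance (x : Int) (out : String) : Decidable (Spec_bin_num x out) := by unfold Spec_bin_num; infer_instance

-- ===== CLAIM (what is proved, stated in full; the proofs are below) =====
def Claim_equal_bin_num : Prop := ∀ (x : Int), Dom_bin_num x → Spec_bin_num x (bin_num x)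

-- ===== LEMMAS AND PROOFS =====

-- A's loop on a positive natural is the LSB-first bit list, in indexed form.
theorem binA_loop_eq_map : ∀ m : Nat, 0 < m →
    binA_loop (m : Int) =
      (List.range (PySem.Int.bitLength (m : Int))).map
        (fun i => (((m >>> i) % 2 : Nat) : Int)) := by
  intro m
  induction m using Nat.strong_induction_on with
  | _ m ih =>
    intro h
    have hfd : PySem.Int.floordiv (m : Int) 2 = ((m / 2 : Nat) : Int) := by
      exact_mod_cast PySem.Int.floordiv_natCast m 2
    have hmod : PySem.Int.mod (m : Int) 2 = ((m % 2 : Nat) : Int) := by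
      exact_mod_cast PySem.Int.mod_natCast m 2
    rw [binA_loop, dif_pos (by exact_mod_cast h), hfd, hmod]
    rw [PySem.Int.bitLength_natCast h]
    rw [List.range_succ_eq_map]
    simp only [List.map_cons, List.map_map]
    by_cases h2 : m / 2 = 0
    · have hm : m = 1 := by omega
      subst hm
      norm_num [PySem.Int.bitLength_zero]
      rw [binA_loop]
      norm_num
    · rw [ih (m / 2) (by omega) (by omega)]
      refine List.cons_eq_cons.mpr ⟨by norm_num, ?_⟩
      apply List.map_congr_left
      intro i _
      simp only [Function.comp_apply]
      congr 1
      rw [Nat.shiftRight_eq_div_pow, Nat.shiftRight_eq_div_pow, pow_succ']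
      rw [Nat.div_div_eq_div_mul]

-- The joined digit strings agree for a positive magnitude: A's reversed LSB-first list
-- is B's MSB-first descending-range pass.
theorem tail_eq (m : Nat) (hm : 0 < m) :
    PySem.Str.join "" (List.map PySem.Int.toStr (if binA_loop (m:Int) = [] then [(0:Int)] else binA_loop (m:Int)).reverse)
      = PySem.Str.join "" (List.map (fun i => PySem.Int.toStr (PySem.Int.band ((m:Int) >>> i.toNat) 1))
          (PySem.List.pyRange ((PySem.Int.bitLength (m:Int) : Int) - 1) (-1) (-1))) := by
  have hb := binA_loop_eq_map m hm
  have hblpos : 0 < PySem.Int.bitLength (m : Int) := by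
    rw [PySem.Int.bitLength_natCast hm]; omega
  have hne : binA_loop (m : Int) ≠ [] := by
    rw [hb]; simp; omega
  rw [if_neg hne, hb]
  congr 1
  rw [PySem.List.pyRange_neg_one_eq_reverse]
  rw [show ((PySem.Int.bitLength ((m:Nat) : Int) : Int) - 1 + 1) = ((PySem.Int.bitLength ((m:Nat) : Int) : Nat) : Int) by ring]
  rw [show ((-1 : Int) + 1) = (0 : Int) by norm_num]
  rw [PySem.List.pyRange_zero_natCast]
  rw [List.map_reverse, List.map_reverse, List.map_map, List.map_map]
  congr 1
  apply List.map_congr_left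
  intro i _
  simp only [Function.comp_apply, Int.toNat_natCast]
  congr 1
  rw [show ((m : Int) >>> ((i : Nat) : Int)) = ((m >>> i : Nat) : Int) by simp]
  rw [show (1 : Int) = ((1:Nat) : Int) by norm_num, PySem.Int.band_natCast]
  rw [Nat.and_one_is_mod]

theorem bin_num_eq_alt : ∀ (x : Int), bin_num x = bin_num_alt x := by
  intro x
  by_cases hx : x = 0
  · subst hx
    have h0 : binA_loop 0 = [] := by rw [binA_loop]; simp
    simp [bin_num, bin_num_alt, h0]
    decide
  · have hm : 0 < x.natAbs := Int.natAbs_pos.mpr hx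
    have habs : |x| = (x.natAbs : Int) := Int.abs_eq_natAbs x
    have hne0 : ((x.natAbs : Int)) ≠ 0 := by exact_mod_cast hm.ne'
    simp only [bin_num, bin_num_alt, habs, if_neg hne0]
    congr 1
    exact tail_eq x.natAbs hm

-- ===== VERDICT (by name: the statement is the Claim_ definition above) =====
theorem bin_num_spec : Claim_equal_bin_num := by
  intro x _
  exact bin_num_eq_alt x
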